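-- pv_equiv track=rewrite | github.com/rootcanal/August | utils.py | preprocess_problem
-- ===== SOURCE A (Python) =====
-- def preprocess_problem(problem):
--     problem = problem.strip().split(" ")
--     for i, x in enumerate(problem):
--         if len(x) == 0:
--             continue
--         if x[-1] in [',', '.', '?']:
--             problem[i] = x[:-1] + " " + x[-1]
--     problem = ' '.join(problem)
--     problem = " " + problem + " "
--     return problem
-- ===== SOURCE B (Python) =====
-- def preprocess_problem(problem):
--     s = problem.strip()
--     out = []
--     for c, nxt in zip(s, s[1:] + ' '):
--         if c in ',.?' and nxt == ' ':
--             out.append(' ')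
--         out.append(c)
--     return ' ' + ''.join(out) + ' '
-- ===== Notes on version B (the rewrite author's own statement) =====
-- stated objective: alternative
-- what changed: Replaces A's strip/split-on-space/per-token-mutate/rejoin pipeline by a single left-to-right character scan over the stripped string that inserts a space before each comma, period or question mark that is followed by a space or by the end of the string.
import Mathlib
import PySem

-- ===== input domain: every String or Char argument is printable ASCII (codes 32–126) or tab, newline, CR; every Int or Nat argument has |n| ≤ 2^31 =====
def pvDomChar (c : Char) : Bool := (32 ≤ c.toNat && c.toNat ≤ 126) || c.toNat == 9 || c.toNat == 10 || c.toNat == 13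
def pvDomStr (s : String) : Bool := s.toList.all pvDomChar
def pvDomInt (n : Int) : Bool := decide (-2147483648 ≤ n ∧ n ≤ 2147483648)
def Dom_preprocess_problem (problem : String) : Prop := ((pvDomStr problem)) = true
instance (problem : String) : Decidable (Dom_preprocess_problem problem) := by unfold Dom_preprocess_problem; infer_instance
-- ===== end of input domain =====

-- B replaces A's split/mutate/join pipeline by a single character scan with one-char lookahead
-- (insert a space before a comma, period or question mark followed by a space or the end). Same return value; no side effects involved.

-- ===== PORT A =====
-- the body of A's for-loop: rewrite one token x of the split
def pvTrA (x : List Char) : List Char :=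
  if x.length = 0 then x
  else
    match PySem.List.pyGet? x (-1) with
    | some c => if [',', '.', '?'].contains c then PySem.List.slice x none (some (-1)) ++ [' '] ++ [c] else x
    | none => x

def preprocess_problem (problem : String) : String :=
  let parts := PySem.Chars.splitOn (PySem.Chars.strip problem.toList) [' ']
  let parts := parts.map pvTrA
  let joined := PySem.Chars.join [' '] parts
  String.ofList ([' '] ++ joined ++ [' '])

-- ===== PORT B =====
def preprocess_problem_alt (problem : String) : String :=
  let s := PySem.Chars.strip problem.toList
  let out := (s.zip (PySem.List.slice s (some 1) none ++ [' '])).foldl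
    (fun acc p =>
      (if (p.1 == ',' || p.1 == '.' || p.1 == '?') && p.2 == ' ' then acc ++ [' '] else acc) ++ [p.1])
    []
  String.ofList ([' '] ++ out ++ [' '])

-- ===== PRECONDITION & SPEC =====
def Spec_preprocess_problem (problem : String) (out : String) : Prop := out = preprocess_problem_alt problem
instance (problem : String) (out : String) : Decidable (Spec_preprocess_problem problem out) := by unfold Spec_preprocess_problem; infer_instance

-- ===== CLAIM (what is proved, stated in full; the proofs are below) =====
def Claim_equal_preprocess_problem : Prop := ∀ (problem : String), Dom_preprocess_problem problem → Spec_preprocess_problem problem (preprocess_problem problem)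

-- ===== LEMMAS AND PROOFS =====

-- reference recursive scan with one-char lookahead (B's loop, recursively)
def pvScan : List Char → List Char
  | [] => []
  | c :: rest =>
      (if [',', '.', '?'].contains c && (rest.headD ' ') == ' ' then [' ', c] else [c]) ++ pvScan rest

-- reference recursive single-space split (A's splitOn, recursively)
def pvSpl : List Char → List (List Char)
  | [] => [[]]
  | c :: rest => if c = ' ' then [] :: pvSpl rest else (pvSpl rest).modifyHead (c :: ·)

theorem pvSpl_ne_nil (l : List Char) : pvSpl l ≠ [] := by
  cases l with
  | nil => simp [pvSpl]
  | cons c r =>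
      simp only [pvSpl]
      split
      · simp
      · cases h : pvSpl r with
        | nil => exact absurd h (pvSpl_ne_nil r)
        | cons a t => simp [List.modifyHead]

theorem pv_join_cons (sep a : List Char) (L : List (List Char)) (h : L ≠ []) :
    PySem.Chars.join sep (a :: L) = a ++ sep ++ PySem.Chars.join sep L := by
  cases L with
  | nil => exact absurd rfl h
  | cons b t => simp [PySem.Chars.join, List.intercalate]

theorem pv_join_cons_head (sep w : List Char) (c : Char) (L : List (List Char)) :
    PySem.Chars.join sep ((c :: w) :: L) = c :: PySem.Chars.join sep (w :: L) := by
  cases L with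
  | nil => simp [PySem.Chars.join, List.intercalate]
  | cons b t => simp [PySem.Chars.join, List.intercalate]

theorem pv_slice_neg_one (l : List Char) : PySem.List.slice l none (some (-1)) = l.dropLast := by
  simp [PySem.List.slice, List.dropLast_eq_take]

theorem pv_pyGet_neg_one (c : Char) (t : List Char) :
    PySem.List.pyGet? (c :: t) (-1) = (c :: t).getLast? := by
  simp [PySem.List.pyGet?, PySem.List.pyIdx?, List.getLast?_eq_getElem?]

theorem pvTrA_nil : pvTrA [] = [] := by simp [pvTrA]

theorem pvTrA_single (c : Char) :
    pvTrA [c] = if [',', '.', '?'].contains c then [' ', c] else [c] := by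
  simp [pvTrA, pv_pyGet_neg_one, pv_slice_neg_one]

theorem pvTrA_cons (c d : Char) (t : List Char) :
    pvTrA (c :: d :: t) = c :: pvTrA (d :: t) := by
  simp only [pvTrA, pv_pyGet_neg_one, pv_slice_neg_one, List.length_cons, List.getLast?_cons_cons]
  cases h : (d :: t).getLast? with
  | none => simp at h
  | some x =>
      simp only [List.dropLast_cons_of_ne_nil (by simp : d :: t ≠ [])]
      by_cases hx : x = ',' ∨ x = '.' ∨ x = '?'
      · simp [hx]
      · simp [hx]

theorem pv_spl_cons_space (rest : List Char) : pvSpl (' ' :: rest) = [] :: pvSpl rest := by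
  simp only [pvSpl]
  rw [if_pos trivial]

theorem pv_spl_cons_ne (c : Char) (rest : List Char) (hc : c ≠ ' ') :
    pvSpl (c :: rest) = (pvSpl rest).modifyHead (c :: ·) := by
  simp only [pvSpl, if_neg hc]

theorem pv_go_spec (fuel : Nat) (l cur : List Char) (acc : List (List Char))
    (h : l.length < fuel) :
    PySem.Chars.splitOn.go [' '] fuel l cur acc
      = acc.reverse ++ (pvSpl l).modifyHead (cur.reverse ++ ·) := by
  induction fuel generalizing l cur acc with
  | zero => omega
  | succ f ih =>
      cases l with
      | nil => simp [PySem.Chars.splitOn.go, pvSpl]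
      | cons c rest =>
          rw [PySem.Chars.splitOn.go]
          by_cases hc : c = ' '
          · subst hc
            have hpre : [' '].isPrefixOf (' ' :: rest) = true := by simp [List.isPrefixOf]
            rw [if_pos hpre]
            rw [ih _ _ _ (by simpa using Nat.lt_of_succ_lt_succ h)]
            rw [pv_spl_cons_space]
            cases hs : pvSpl rest with
            | nil => exact absurd hs (pvSpl_ne_nil rest)
            | cons a t =>
                simp only [List.length_cons, List.length_nil, List.drop_succ_cons,
                  List.drop_zero, hs]
                simp [List.modifyHead]
          · have hpre : [' '].isPrefixOf (c :: rest) = false := by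
              simp [List.isPrefixOf]
              intro hcc
              exact absurd hcc.symm hc
            rw [if_neg (by simp [hpre])]
            rw [ih _ _ _ (by simpa using Nat.lt_of_succ_lt_succ h)]
            rw [pv_spl_cons_ne c rest hc]
            cases hs : pvSpl rest with
            | nil => exact absurd hs (pvSpl_ne_nil rest)
            | cons a t => simp [List.modifyHead]

theorem pv_splitOn_eq (l : List Char) : PySem.Chars.splitOn l [' '] = pvSpl l := by
  rw [PySem.Chars.splitOn, pv_go_spec _ _ _ _ (by omega)]
  cases hs : pvSpl l with
  | nil => exact absurd hs (pvSpl_ne_nil l)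
  | cons a t => simp [List.modifyHead]

theorem pv_fold_eq_scan (l : List Char) (acc : List Char) :
    (l.zip (l.drop 1 ++ [' '])).foldl
      (fun acc p =>
        (if (p.1 == ',' || p.1 == '.' || p.1 == '?') && p.2 == ' ' then acc ++ [' '] else acc) ++ [p.1])
      acc = acc ++ pvScan l := by
  induction l generalizing acc with
  | nil => simp [pvScan]
  | cons c rest ih =>
      have hzip : (c :: rest).zip ((c :: rest).drop 1 ++ [' '])
          = (c, rest.headD ' ') :: rest.zip (rest.drop 1 ++ [' ']) := by
        cases rest <;> simp
      rw [hzip, List.foldl_cons, ih]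
      have hcond : ((c == ',' || c == '.' || c == '?') && (rest.headD ' ') == ' ')
          = ([',', '.', '?'].contains c && (rest.headD ' ') == ' ') := by
        simp only [List.contains_cons, List.contains_nil, Bool.or_false, Bool.or_assoc]
      simp only [pvScan, hcond]
      split <;> simp

theorem pv_scan_nil : pvScan [] = [] := rfl

theorem pv_scan_cons (c : Char) (rest : List Char) :
    pvScan (c :: rest)
      = (if [',', '.', '?'].contains c && (rest.headD ' ') == ' ' then [' ', c] else [c])
        ++ pvScan rest := by
  simp only [pvScan]

theorem pv_map_trA_ne_nil (l : List Char) : (pvSpl l).map pvTrA ≠ [] := by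
  simp [pvSpl_ne_nil]

theorem pv_join_spl_eq_scan (l : List Char) :
    PySem.Chars.join [' '] ((pvSpl l).map pvTrA) = pvScan l := by
  have hsp : ([',', '.', '?'].contains ' ') = false := by decide
  induction l with
  | nil => simp [pvSpl, pvScan, pvTrA_nil, PySem.Chars.join, List.intercalate]
  | cons c rest ih =>
      by_cases hc : c = ' '
      · subst hc
        rw [pv_spl_cons_space, List.map_cons, pv_join_cons _ _ _ (pv_map_trA_ne_nil rest), ih,
          pvTrA_nil]
        rw [pv_scan_cons, hsp]
        simp only [Bool.false_and, List.nil_append, Bool.false_eq_true, if_false]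
      · cases rest with
        | nil =>
            have hs : pvSpl [c] = [[c]] := by
              rw [pv_spl_cons_ne c [] hc]; rfl
            rw [hs]
            rw [pv_scan_cons]
            simp [PySem.Chars.join, List.intercalate, pvTrA_single, pv_scan_nil]
        | cons d r =>
            by_cases hd : d = ' '
            · subst hd
              have hs : pvSpl (c :: ' ' :: r) = [c] :: pvSpl r := by
                rw [pv_spl_cons_ne c _ hc, pv_spl_cons_space]; rfl
              rw [pv_spl_cons_space, List.map_cons, pvTrA_nil,
                pv_join_cons _ _ _ (pv_map_trA_ne_nil r)] at ih
              have hscan : pvScan (' ' :: r) = ' ' :: pvScan r := by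
                rw [pv_scan_cons, hsp]; simp
              rw [hscan, List.nil_append] at ih
              have hJ : PySem.Chars.join [' '] ((pvSpl r).map pvTrA) = pvScan r := by
                have := ih
                simpa using this
              rw [hs, List.map_cons, pv_join_cons _ _ _ (pv_map_trA_ne_nil r), hJ, pvTrA_single]
              have hscan2 : pvScan (c :: ' ' :: r)
                  = (if [',', '.', '?'].contains c then [' ', c] else [c]) ++ (' ' :: pvScan r) := by
                rw [pv_scan_cons, hscan]
                simp
              rw [hscan2]
              split <;> simp
            · have hr : ∃ w t, pvSpl r = w :: t := by
                cases hw : pvSpl r with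
                | nil => exact absurd hw (pvSpl_ne_nil r)
                | cons a t => exact ⟨a, t, rfl⟩
              obtain ⟨w, t, hw⟩ := hr
              have hs1 : pvSpl (d :: r) = (d :: w) :: t := by
                rw [pv_spl_cons_ne d r hd, hw]; rfl
              have hs : pvSpl (c :: d :: r) = (c :: d :: w) :: t := by
                rw [pv_spl_cons_ne c _ hc, hs1]; rfl
              rw [hs, List.map_cons, pvTrA_cons, pv_join_cons_head, ← List.map_cons, ← hs1, ih]
              have hdb : (d == ' ') = false := by simp [hd]
              rw [pv_scan_cons c (d :: r)]
              simp [hdb]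

-- ===== VERDICT (by name: the statement is the Claim_ definition above) =====
theorem preprocess_problem_spec : Claim_equal_preprocess_problem := by
  intro problem _
  show String.ofList ([' '] ++ PySem.Chars.join [' ']
        ((PySem.Chars.splitOn (PySem.Chars.strip problem.toList) [' ']).map pvTrA) ++ [' '])
      = String.ofList ([' '] ++
        ((PySem.Chars.strip problem.toList).zip
          (PySem.List.slice (PySem.Chars.strip problem.toList) (some 1) none ++ [' '])).foldl
          (fun acc p =>
            (if (p.1 == ',' || p.1 == '.' || p.1 == '?') && p.2 == ' ' then acc ++ [' '] else acc)
              ++ [p.1]) [] ++ [' '])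
  rw [pv_splitOn_eq, pv_join_spl_eq_scan, PySem.List.slice_from _ (by norm_num),
    Int.toNat_one, pv_fold_eq_scan]
  simp
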